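-- pv_equiv track=rewrite | github.com/MohammedNadeemPasha/LeetcodePractice | Graph/DisjointUnionSet/SentenceSimilarityII.py | sentenceSimilarity
-- ===== SOURCE A (Python) =====
-- from collections import defaultdict
--
-- def sentenceSimilarity(word1,word2,pairs):
--     if len(word1) != len(word2):
--         return False
--     parent=defaultdict(str)
--     for i in range(len(word1)):
--         parent[word1[i]]=word1[i]
--         parent[word2[i]]=word2[i]
--     def find(x):
--         if parent[x] != x:
--             parent[x]=find(parent[x])
--         return parent[x]
--     def union(x,y):
--         rootX=find(x)
--         rootY=find(y)
--         if rootX != rootY: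
--             parent[rootX]=rootY
--
--     for pair in pairs:
--         x,y=pair
--         if x not in parent:
--             parent[x]=x
--         if y not in parent:
--             parent[y]=y
--         union(x,y)
--     for i in range(len(word2)):
--         if find(word2[i]) != find(word1[i]):
--             return False
--     return True
-- ===== SOURCE B (Python) =====
-- def sentenceSimilarity(word1, word2, pairs):
--     if len(word1) != len(word2):
--         return False
--     # quick-find: flat map word -> component label, relabel a whole class on merge
--     label = {}
--     for x, y in pairs:
--         if x not in label:
--             label[x] = x
--         if y not in label:
--             label[y] = y
--         lx, ly = label[x], label[y]
--         if lx != ly: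
--             label = {k: (ly if v == lx else v) for k, v in label.items()}
--     return all(label.get(a, a) == label.get(b, b) for a, b in zip(word1, word2))
-- ===== Notes on version B (the rewrite author's own statement) =====
-- stated objective: alternative
-- what changed: Replaces A's recursive path-compressing union-find (parent forest, find/union) with a flat quick-find label map: each word maps directly to its component label and a merge relabels the whole class in one scan, so there is no find recursion and no path compression.
-- outside the precondition, e.g. on sentenceSimilarity(['a'], ['b'], [['a', 'b', 'c']]): A raises ValueError, B raises ValueError
import Mathlib
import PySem

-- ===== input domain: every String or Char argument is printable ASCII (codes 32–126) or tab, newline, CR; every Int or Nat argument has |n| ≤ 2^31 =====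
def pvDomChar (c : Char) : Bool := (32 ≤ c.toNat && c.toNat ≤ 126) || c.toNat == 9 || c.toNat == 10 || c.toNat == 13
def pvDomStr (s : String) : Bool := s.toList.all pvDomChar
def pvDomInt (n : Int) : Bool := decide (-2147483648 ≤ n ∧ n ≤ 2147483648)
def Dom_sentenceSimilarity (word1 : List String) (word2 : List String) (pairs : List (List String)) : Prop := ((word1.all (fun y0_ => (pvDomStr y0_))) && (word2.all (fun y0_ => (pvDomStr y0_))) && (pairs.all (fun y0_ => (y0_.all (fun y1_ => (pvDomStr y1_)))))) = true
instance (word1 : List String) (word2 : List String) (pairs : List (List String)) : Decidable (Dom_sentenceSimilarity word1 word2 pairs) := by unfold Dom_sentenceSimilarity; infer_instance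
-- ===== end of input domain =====

-- B replaces A's recursive path-compressing union-find with a flat label map (quick-find)
-- that relabels a whole class on each merge; objective: alternative (no speed claim).

-- ===== PORT A =====
-- A's `find` with path compression: recursion made total by fuel (d.size + 1 at each
-- call site, always sufficient on A's acyclic parent maps); `parent[x]` reads use
-- defaultdict's '' default exactly as Python, never reached on keys actually queried.
def ufFind (fuel : Nat) (d : PySem.Dict String String) (x : String) :
    String × PySem.Dict String String :=
  match fuel with
  | 0 => (d.getD x "", d)
  | fuel + 1 =>
    let p := d.getD x ""
    if p ≠ x then
      let r := ufFind fuel d p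
      (r.1, r.2.insert x r.1)
    else (p, d)

def ufUnion (d : PySem.Dict String String) (x y : String) : PySem.Dict String String :=
  let fx := ufFind (d.size + 1) d x
  let fy := ufFind (fx.2.size + 1) fx.2 y
  if fx.1 ≠ fy.1 then fy.2.insert fx.1 fy.1 else fy.2

-- `for i in range(len(word1)): parent[word1[i]] = word1[i]; parent[word2[i]] = word2[i]`
def ufInit (word1 word2 : List String) : PySem.Dict String String :=
  (PySem.List.pyRange 0 (word1.length : Int) 1).foldl
    (fun d i =>
      let a := (PySem.List.pyGet? word1 i).getD ""
      let b := (PySem.List.pyGet? word2 i).getD ""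
      (d.insert a a).insert b b)
    PySem.Dict.empty

-- pairs loop; a pair that is not a 2-list makes Python raise ValueError (outside Pre_)
def ufPairs (pairs : List (List String)) (d : PySem.Dict String String) :
    PySem.Dict String String :=
  pairs.foldl
    (fun d pair =>
      match pair with
      | [x, y] =>
        let d1 := if d.contains x then d else d.insert x x
        let d2 := if d1.contains y then d1 else d1.insert y y
        ufUnion d2 x y
      | _ => d)
    d

-- `for i in range(len(word2)): if find(word2[i]) != find(word1[i]): return False`
def ufCheck (word1 word2 : List String) (d : PySem.Dict String String)
    (idxs : List Int) : Bool :=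
  match idxs with
  | [] => true
  | i :: rest =>
    let f2 := ufFind (d.size + 1) d ((PySem.List.pyGet? word2 i).getD "")
    let f1 := ufFind (f2.2.size + 1) f2.2 ((PySem.List.pyGet? word1 i).getD "")
    if f2.1 ≠ f1.1 then false else ufCheck word1 word2 f1.2 rest

def sentenceSimilarity (word1 : List String) (word2 : List String)
    (pairs : List (List String)) : Bool :=
  if word1.length ≠ word2.length then false
  else
    ufCheck word1 word2 (ufPairs pairs (ufInit word1 word2))
      (PySem.List.pyRange 0 (word2.length : Int) 1)

-- ===== PORT B =====
-- the dict comprehension `{k: (ly if v == lx else v) for k, v in label.items()}`: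
-- same keys in the same order, values remapped — exact as Dict.mk over mapped items
def sentenceSimilarity_alt (word1 : List String) (word2 : List String)
    (pairs : List (List String)) : Bool :=
  if word1.length ≠ word2.length then false
  else
    let label := pairs.foldl
      (fun l pair =>
        match pair with
        | [x, y] =>
          let l1 := if l.contains x then l else l.insert x x
          let l2 := if l1.contains y then l1 else l1.insert y y
          let lx := l2.getD x x
          let ly := l2.getD y y
          if lx ≠ ly then
            PySem.Dict.mk (l2.items.map (fun kv => (kv.1, if kv.2 = lx then ly else kv.2)))
          else l2
        | _ => l)
      PySem.Dict.empty
    (word1.zip word2).all (fun ab => (label.getD ab.1 ab.1) == (label.getD ab.2 ab.2))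

-- ===== PRECONDITION & SPEC =====
-- Pre_ excludes only inputs where Python A raises: when the length guard passes,
-- a pair whose length is not 2 makes `x, y = pair` raise ValueError (B raises too).
def Pre_sentenceSimilarity (word1 : List String) (word2 : List String) (pairs : List (List String)) : Prop :=
  word1.length = word2.length → ∀ p ∈ pairs, p.length = 2
instance (word1 : List String) (word2 : List String) (pairs : List (List String)) : Decidable (Pre_sentenceSimilarity word1 word2 pairs) := by unfold Pre_sentenceSimilarity; infer_instance

def pvWitness_sentenceSimilarity : List String × List String × List (List String) :=
  (["hi", "world"], ["hello", "world"], [["hi", "hello"]])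

def Spec_sentenceSimilarity (word1 : List String) (word2 : List String) (pairs : List (List String)) (out : Bool) : Prop := out = sentenceSimilarity_alt word1 word2 pairs
instance (word1 : List String) (word2 : List String) (pairs : List (List String)) (out : Bool) : Decidable (Spec_sentenceSimilarity word1 word2 pairs out) := by unfold Spec_sentenceSimilarity; infer_instance

-- ===== CLAIM (what is proved, stated in full; the proofs are below) =====
def Claim_equal_sentenceSimilarity : Prop := ∀ (word1 : List String) (word2 : List String) (pairs : List (List String)), Dom_sentenceSimilarity word1 word2 pairs → Pre_sentenceSimilarity word1 word2 pairs → Spec_sentenceSimilarity word1 word2 pairs (sentenceSimilarity word1 word2 pairs)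

-- ===== LEMMAS AND PROOFS =====

-- semantic layer for A's parent forest and B's label map (proof-only helpers)
def pvPar (d : PySem.Dict String String) (z : String) : String := (d.get? z).getD z

def pvRootF (d : PySem.Dict String String) : Nat → String → String
  | 0, z => z
  | n + 1, z => if pvPar d z = z then z else pvRootF d n (pvPar d z)

def pvRooted (d : PySem.Dict String String) (z : String) (n : Nat) : Prop :=
  pvPar d (pvRootF d n z) = pvRootF d n z

def pvRoot (d : PySem.Dict String String) (z : String) : String :=
  pvRootF d d.keys.length z

def pvVK (d : PySem.Dict String String) : Prop := ∀ p ∈ d.items, p.2 ∈ d.keys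

def pvRank (d : PySem.Dict String String) (rk : String → Nat) : Prop :=
  ∀ z w, d.get? z = some w → w = z ∨ rk w < rk z

def pvWF (d : PySem.Dict String String) : Prop := pvVK d ∧ ∃ rk, pvRank d rk

def pvLab (d : PySem.Dict String String) (z : String) : String := d.getD z z

-- B's invariant: distinct keys, values are keys, and every value is its own label
def pvBWF (d : PySem.Dict String String) : Prop :=
  d.keys.Nodup ∧ ∀ p ∈ d.items, p.2 ∈ d.keys ∧ d.getD p.2 p.2 = p.2

def pvREL (dA dB : PySem.Dict String String) : Prop :=
  ∀ u v : String, pvRoot dA u = pvRoot dA v ↔ pvLab dB u = pvLab dB v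

lemma pvPar_of_not_mem {d : PySem.Dict String String} {z : String} (h : z ∉ d.keys) :
    pvPar d z = z := by
  simp [pvPar, (PySem.Dict.get?_eq_none_iff_not_mem_keys d z).2 h]

lemma pvPar_get? {d : PySem.Dict String String} {z : String} (h : pvPar d z ≠ z) :
    d.get? z = some (pvPar d z) := by
  unfold pvPar at *
  cases hg : d.get? z with
  | none => rw [hg] at h; simp at h
  | some w => rfl

lemma pvPar_mem {d : PySem.Dict String String} {z : String} (hVK : pvVK d)
    (h : pvPar d z ≠ z) : z ∈ d.keys ∧ pvPar d z ∈ d.keys := by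
  have hg := pvPar_get? h
  have hitem := PySem.Dict.mem_items_of_get?_eq_some d hg
  exact ⟨PySem.Dict.mem_keys_of_mem_items d hitem, hVK _ hitem⟩

lemma pvRootF_fix {d : PySem.Dict String String} {z : String} (h : pvPar d z = z) :
    ∀ n, pvRootF d n z = z := by
  intro n; cases n with
  | zero => rfl
  | succ n => simp [pvRootF, h]

lemma pvRootF_step {d : PySem.Dict String String} {z : String} (h : pvPar d z ≠ z) (n : Nat) :
    pvRootF d (n + 1) z = pvRootF d n (pvPar d z) := by
  simp [pvRootF, h]

lemma pvRootF_add (d : PySem.Dict String String) (m : Nat) :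
    ∀ n z, pvRootF d (m + n) z = pvRootF d m (pvRootF d n z) := by
  intro n
  induction n with
  | zero => intro z; rfl
  | succ n ih =>
    intro z
    by_cases h : pvPar d z = z
    · rw [pvRootF_fix h, pvRootF_fix h, pvRootF_fix h]
    · have : m + (n + 1) = (m + n) + 1 := rfl
      rw [this, pvRootF_step h, pvRootF_step h, ih]

lemma pvRooted_mono {d : PySem.Dict String String} {z : String} {n m : Nat}
    (h : pvRooted d z n) (hnm : n ≤ m) :
    pvRootF d m z = pvRootF d n z ∧ pvRooted d z m := by
  obtain ⟨k, rfl⟩ := Nat.exists_eq_add_of_le hnm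
  have hv : pvRootF d (n + k) z = pvRootF d n z := by
    rw [Nat.add_comm n k, pvRootF_add, pvRootF_fix h]
  exact ⟨hv, by unfold pvRooted; rw [hv]; exact h⟩

lemma pvRooted_unique {d : PySem.Dict String String} {z : String} {a b : Nat}
    (ha : pvRooted d z a) (hb : pvRooted d z b) : pvRootF d a z = pvRootF d b z := by
  rcases le_total a b with h | h
  · exact ((pvRooted_mono ha h).1).symm
  · exact (pvRooted_mono hb h).1

lemma pvRooted_of_fix {d : PySem.Dict String String} {z : String} (h : pvPar d z = z)
    (n : Nat) : pvRooted d z n := by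
  unfold pvRooted; rw [pvRootF_fix h]; exact h

lemma pvRooted_step {d : PySem.Dict String String} {z : String} {n : Nat}
    (hz : pvPar d z ≠ z) (h : pvRooted d z (n + 1)) : pvRooted d (pvPar d z) n := by
  unfold pvRooted at *
  rwa [pvRootF_step hz] at h

lemma pvRank_of_par {d : PySem.Dict String String} {rk : String → Nat} (hR : pvRank d rk)
    {z : String} (h : pvPar d z ≠ z) : rk (pvPar d z) < rk z := by
  rcases hR z _ (pvPar_get? h) with he | hlt
  · exact absurd he h
  · exact hlt

lemma pvRooted_of_filter_le {d : PySem.Dict String String} {rk : String → Nat}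
    (hVK : pvVK d) (hR : pvRank d rk) :
    ∀ n z, (d.keys.filter (fun k => decide (rk k < rk z))).length ≤ n → pvRooted d z n := by
  intro n
  induction n with
  | zero =>
    intro z _
    by_cases h : pvPar d z = z
    · exact pvRooted_of_fix h 0
    · have hw := pvRank_of_par hR h
      have hmem := (pvPar_mem hVK h).2
      have : pvPar d z ∈ d.keys.filter (fun k => decide (rk k < rk z)) :=
        List.mem_filter.2 ⟨hmem, by simpa using hw⟩
      have := List.length_pos_of_mem this
      omega
  | succ n ih =>
    intro z hlen
    by_cases h : pvPar d z = z
    · exact pvRooted_of_fix h _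
    · have hrk := pvRank_of_par hR h
      have hwk := (pvPar_mem hVK h).2
      set w := pvPar d z with hw
      have hsub : (d.keys.filter (fun k => decide (rk k < rk w))).Sublist
          (d.keys.filter (fun k => decide (rk k < rk z))) :=
        List.monotone_filter_right _ (fun a ha => by
          simp only [decide_eq_true_eq] at *; omega)
      have hlt : (d.keys.filter (fun k => decide (rk k < rk w))).length <
          (d.keys.filter (fun k => decide (rk k < rk z))).length := by
        rcases Nat.lt_or_ge (d.keys.filter (fun k => decide (rk k < rk w))).length
            (d.keys.filter (fun k => decide (rk k < rk z))).length with hx | hx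
        · exact hx
        · exfalso
          have heq := hsub.eq_of_length (Nat.le_antisymm hsub.length_le hx)
          have hin : w ∈ d.keys.filter (fun k => decide (rk k < rk z)) :=
            List.mem_filter.2 ⟨hwk, by simpa using hrk⟩
          rw [← heq] at hin
          have := (List.mem_filter.1 hin).2
          simp at this
      have hrec : pvRooted d w n := ih w (by omega)
      unfold pvRooted
      rwa [pvRootF_step h]

lemma pvRooted_len {d : PySem.Dict String String} (hWF : pvWF d) (z : String) :
    pvRooted d z d.keys.length :=
  let ⟨hVK, _rk, hR⟩ := hWF
  pvRooted_of_filter_le hVK hR _ z (List.length_filter_le _ _)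

lemma pvRoot_fixp {d : PySem.Dict String String} (hWF : pvWF d) (z : String) :
    pvPar d (pvRoot d z) = pvRoot d z := pvRooted_len hWF z

lemma pvRoot_eq_rootF {d : PySem.Dict String String} (hWF : pvWF d) {z : String} {n : Nat}
    (h : pvRooted d z n) : pvRoot d z = pvRootF d n z :=
  pvRooted_unique (pvRooted_len hWF z) h

lemma pvRoot_of_fix {d : PySem.Dict String String} {z : String} (h : pvPar d z = z) :
    pvRoot d z = z := pvRootF_fix h _

lemma pvRoot_mem {d : PySem.Dict String String} (hVK : pvVK d) :
    ∀ n {z : String}, z ∈ d.keys → pvRootF d n z ∈ d.keys := by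
  intro n
  induction n with
  | zero => intro z hz; exact hz
  | succ n ih =>
    intro z hz
    by_cases h : pvPar d z = z
    · rw [pvRootF_fix h]; exact hz
    · rw [pvRootF_step h]; exact ih (pvPar_mem hVK h).2

lemma pvRoot_par {d : PySem.Dict String String} (hWF : pvWF d) (z : String) :
    pvRoot d (pvPar d z) = pvRoot d z := by
  by_cases h : pvPar d z = z
  · rw [h]
  · have h1 : pvRooted d z (d.keys.length + 1) := (pvRooted_mono (pvRooted_len hWF z) (by omega)).2
    have h2 : pvRooted d (pvPar d z) d.keys.length := pvRooted_step h h1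
    have := pvRoot_eq_rootF hWF h2
    rw [this]
    have hv : pvRootF d (d.keys.length + 1) z = pvRootF d d.keys.length z :=
      (pvRooted_mono (pvRooted_len hWF z) (by omega)).1
    rw [← pvRootF_step h] at *
    exact hv

-- the root of a non-fixpoint has strictly smaller rank
lemma pvRank_rootF_lt {d : PySem.Dict String String} {rk : String → Nat} (hR : pvRank d rk) :
    ∀ n z, pvRootF d n z = z ∨ rk (pvRootF d n z) < rk z := by
  intro n
  induction n with
  | zero => intro z; exact Or.inl rfl
  | succ n ih =>
    intro z
    by_cases h : pvPar d z = z
    · rw [pvRootF_fix h]; exact Or.inl rfl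
    · rw [pvRootF_step h]
      have hlt := pvRank_of_par hR h
      rcases ih (pvPar d z) with he | hl
      · rw [he]; exact Or.inr hlt
      · exact Or.inr (by omega)

lemma pvRank_root_lt {d : PySem.Dict String String} {rk : String → Nat} (hWF : pvWF d)
    (hR : pvRank d rk) {z : String} (h : pvPar d z ≠ z) : rk (pvRoot d z) < rk z := by
  rcases pvRank_rootF_lt hR d.keys.length z with he | hl
  · exfalso
    have := pvRoot_fixp hWF z
    unfold pvRoot at *
    rw [he] at this
    exact h this
  · exact hl

lemma pvRoot_ne_of_par_ne {d : PySem.Dict String String} (hWF : pvWF d) {z : String}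
    (h : pvPar d z ≠ z) : pvRoot d z ≠ z := by
  intro he
  have := pvRoot_fixp hWF z
  rw [he] at this
  exact h this

lemma pvPar_insert (d : PySem.Dict String String) (x r z : String) :
    pvPar (d.insert x r) z = if z = x then r else pvPar d z := by
  unfold pvPar
  rw [PySem.Dict.get?_insert]
  by_cases h : z = x <;> simp [h]

lemma pvRootF_congr {d1 d2 : PySem.Dict String String} (h : ∀ u, pvPar d1 u = pvPar d2 u) :
    ∀ n z, pvRootF d1 n z = pvRootF d2 n z := by
  intro n
  induction n with
  | zero => intro z; rfl
  | succ n ih =>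
    intro z
    by_cases hz : pvPar d1 z = z
    · rw [pvRootF_fix hz, pvRootF_fix (by rw [← h]; exact hz)]
    · rw [pvRootF_step hz, pvRootF_step (by rw [← h]; exact hz), h, ih]

lemma pvRoot_congr {d1 d2 : PySem.Dict String String} (hWF1 : pvWF d1) (hWF2 : pvWF d2)
    (h : ∀ u, pvPar d1 u = pvPar d2 u) (z : String) : pvRoot d1 z = pvRoot d2 z := by
  have h1 : pvRooted d2 z d1.keys.length := by
    unfold pvRooted
    rw [← pvRootF_congr h, ← h]
    exact pvRooted_len hWF1 z
  rw [pvRoot_eq_rootF hWF2 h1, ← pvRootF_congr h]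
  rfl

lemma pvVK_insert {d : PySem.Dict String String} (hVK : pvVK d) {x r : String}
    (hr : r ∈ d.keys) : pvVK (d.insert x r) := by
  intro p hp
  rcases (PySem.Dict.mem_items_insert d x r p).1 hp with he | ⟨hm, _⟩
  · rw [he]
    exact (PySem.Dict.mem_keys_insert d x r r).2 (Or.inr hr)
  · exact (PySem.Dict.mem_keys_insert d x p.2 r).2 (Or.inr (hVK _ hm))

lemma pvRank_insert {d : PySem.Dict String String} {rk : String → Nat} (hR : pvRank d rk)
    {x r : String} (hlt : rk r < rk x) : pvRank (d.insert x r) rk := by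
  intro z w hg
  rw [PySem.Dict.get?_insert] at hg
  by_cases hz : z = x
  · rw [if_pos hz] at hg
    cases hg
    subst hz
    exact Or.inr hlt
  · rw [if_neg hz] at hg
    exact hR z w hg

-- inserting a self-loop on a fresh key changes no pvPar value
lemma pvPar_insert_self_fresh {d : PySem.Dict String String} {x : String} (hx : x ∉ d.keys) :
    ∀ z, pvPar (d.insert x x) z = pvPar d z := by
  intro z
  rw [pvPar_insert]
  by_cases h : z = x
  · rw [if_pos h, h, pvPar_of_not_mem hx]
  · rw [if_neg h]

-- C1: compressing one link (x ↦ its root) preserves every root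
lemma pvInsert_root_pres {d : PySem.Dict String String} {rk : String → Nat} {x r : String}
    (hVK : pvVK d) (hR : pvRank d rk) (hx : x ∈ d.keys) (hpar : pvPar d x ≠ x)
    (hroot : pvRoot d x = r) : ∀ z, pvRoot (d.insert x r) z = pvRoot d z := by
  have hWF : pvWF d := ⟨hVK, rk, hR⟩
  have hrfix : pvPar d r = r := by rw [← hroot]; exact pvRoot_fixp hWF x
  have hrx : r ≠ x := by
    intro he; rw [← hroot] at he; exact pvRoot_ne_of_par_ne hWF hpar he
  have hrk : rk r < rk x := by rw [← hroot]; exact pvRank_root_lt hWF hR hpar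
  have hrmem : r ∈ d.keys := by rw [← hroot]; exact pvRoot_mem hVK _ hx
  have hWF' : pvWF (d.insert x r) := ⟨pvVK_insert hVK hrmem, rk, pvRank_insert hR hrk⟩
  have hpar'r : pvPar (d.insert x r) r = r := by rw [pvPar_insert, if_neg hrx]; exact hrfix
  have hS : ∀ n z, pvRooted d z n →
      ∃ m, pvRooted (d.insert x r) z m ∧ pvRootF (d.insert x r) m z = pvRootF d n z := by
    intro n
    induction n with
    | zero =>
      intro z hz
      unfold pvRooted at hz
      simp only [pvRootF] at hz
      have hzx : z ≠ x := fun he => hpar (he ▸ hz)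
      refine ⟨0, ?_, rfl⟩
      unfold pvRooted
      simp only [pvRootF]
      rw [pvPar_insert, if_neg hzx]
      exact hz
    | succ n ih =>
      intro z hz
      by_cases hfix : pvPar d z = z
      · have hzx : z ≠ x := fun he => hpar (he ▸ hfix)
        refine ⟨0, ?_, ?_⟩
        · unfold pvRooted
          simp only [pvRootF]
          rw [pvPar_insert, if_neg hzx]
          exact hfix
        · rw [pvRootF_fix hfix]; rfl
      · by_cases hzx : z = x
        · subst hzx
          have hval : pvRootF d (n + 1) z = r := by
            rw [← pvRoot_eq_rootF hWF hz, hroot]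
          have hpz : pvPar (d.insert z r) z = r := by rw [pvPar_insert, if_pos rfl]
          refine ⟨1, ?_, ?_⟩
          · unfold pvRooted
            simp only [pvRootF]
            rw [hpz, if_neg hrx]
            exact hpar'r
          · rw [hval]
            simp only [pvRootF]
            rw [hpz, if_neg hrx]
        · have hpz : pvPar (d.insert x r) z = pvPar d z := by
            rw [pvPar_insert, if_neg hzx]
          obtain ⟨m, hm, hv⟩ := ih (pvPar d z) (pvRooted_step hfix hz)
          refine ⟨m + 1, ?_, ?_⟩
          · unfold pvRooted
            rw [pvRootF_step (by rw [hpz]; exact hfix), hpz]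
            exact hm
          · rw [pvRootF_step (by rw [hpz]; exact hfix), hpz, hv, ← pvRootF_step hfix]
  intro z
  obtain ⟨m, hm, hv⟩ := hS d.keys.length z (pvRooted_len hWF z)
  rw [pvRoot_eq_rootF hWF' hm, hv]
  rfl

-- C2: linking root x beneath root r merges the class of x into the class of r
lemma pvInsert_root_merge {d : PySem.Dict String String} {rk : String → Nat} {x r : String}
    (hVK : pvVK d) (hR : pvRank d rk) (hx : x ∈ d.keys) (hrmem : r ∈ d.keys)
    (hpx : pvPar d x = x) (hpr : pvPar d r = r) (hxr : x ≠ r) :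
    (∀ z, pvRoot (d.insert x r) z = if pvRoot d z = x then r else pvRoot d z) ∧
      pvWF (d.insert x r) := by
  have hWF : pvWF d := ⟨hVK, rk, hR⟩
  have hrootr : pvRoot d r = r := pvRoot_of_fix hpr
  have hrootx : pvRoot d x = x := pvRoot_of_fix hpx
  set rk' : String → Nat := fun z => if pvRoot d z = r then rk z else rk z + rk r + 1 with hrk'
  have hR' : pvRank (d.insert x r) rk' := by
    intro z w hg
    rw [PySem.Dict.get?_insert] at hg
    by_cases hz : z = x
    · rw [if_pos hz] at hg
      cases hg
      subst hz
      refine Or.inr ?_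
      simp only [hrk', hrootr, hrootx]
      rw [if_neg hxr]
      simp
    · rw [if_neg hz] at hg
      rcases hR z w hg with he | hlt
      · exact Or.inl he
      · refine Or.inr ?_
        have hpz : pvPar d z = w := by
          unfold pvPar; rw [hg]; rfl
        have hne : pvPar d z ≠ z := by
          rw [hpz]; intro he; rw [he] at hlt; omega
        have : pvRoot d w = pvRoot d z := by rw [← hpz]; exact pvRoot_par hWF z
        simp only [hrk', this]
        by_cases hb : pvRoot d z = r <;> simp [hb] <;> omega
  have hVK' : pvVK (d.insert x r) := pvVK_insert hVK hrmem
  have hWF' : pvWF (d.insert x r) := ⟨hVK', rk', hR'⟩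
  have hpar'r : pvPar (d.insert x r) r = r := by
    rw [pvPar_insert, if_neg (fun he => hxr he.symm)]; exact hpr
  have hpar'x : pvPar (d.insert x r) x = r := by rw [pvPar_insert, if_pos rfl]
  have hS : ∀ n z, pvRooted d z n →
      ∃ m, pvRooted (d.insert x r) z m ∧
        pvRootF (d.insert x r) m z = (if pvRootF d n z = x then r else pvRootF d n z) := by
    intro n
    induction n with
    | zero =>
      intro z hz
      unfold pvRooted at hz
      simp only [pvRootF] at hz ⊢
      by_cases hzx : z = x
      · subst hzx
        refine ⟨1, ?_, ?_⟩
        · unfold pvRooted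
          simp only [pvRootF]
          rw [hpar'x, if_neg (fun he => (hxr he.symm).elim ), hpar'r]
        · simp only [pvRootF]
          rw [hpar'x, if_neg (fun he => (hxr he.symm).elim )]
          simp
      · refine ⟨0, ?_, ?_⟩
        · unfold pvRooted
          simp only [pvRootF]
          rw [pvPar_insert, if_neg hzx]
          exact hz
        · simp only [pvRootF]
          rw [if_neg hzx]
    | succ n ih =>
      intro z hz
      by_cases hfix : pvPar d z = z
      · by_cases hzx : z = x
        · subst hzx
          refine ⟨1, ?_, ?_⟩
          · unfold pvRooted
            simp only [pvRootF]
            rw [hpar'x, if_neg (fun he => (hxr he.symm).elim), hpar'r]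
          · rw [pvRootF_fix hfix, if_pos rfl]
            simp only [pvRootF]
            rw [hpar'x, if_neg (fun he => (hxr he.symm).elim)]
        · refine ⟨0, ?_, ?_⟩
          · unfold pvRooted
            simp only [pvRootF]
            rw [pvPar_insert, if_neg hzx]
            exact hfix
          · rw [pvRootF_fix hfix, if_neg hzx]
            rfl
      · have hzx : z ≠ x := fun he => hfix (he ▸ hpx)
        have hpz : pvPar (d.insert x r) z = pvPar d z := by
          rw [pvPar_insert, if_neg hzx]
        obtain ⟨m, hm, hv⟩ := ih (pvPar d z) (pvRooted_step hfix hz)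
        refine ⟨m + 1, ?_, ?_⟩
        · unfold pvRooted
          rw [pvRootF_step (by rw [hpz]; exact hfix), hpz]
          exact hm
        · rw [pvRootF_step (by rw [hpz]; exact hfix), hpz, hv, ← pvRootF_step hfix]
  refine ⟨?_, hWF'⟩
  intro z
  obtain ⟨m, hm, hv⟩ := hS d.keys.length z (pvRooted_len hWF z)
  rw [pvRoot_eq_rootF hWF' hm, hv]
  rfl

lemma pvGetD_par {d : PySem.Dict String String} {x : String} (hx : x ∈ d.keys) :
    d.getD x "" = pvPar d x := by
  cases hg : d.get? x with
  | none => exact absurd hx ((PySem.Dict.get?_eq_none_iff_not_mem_keys d x).1 hg)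
  | some w =>
    rw [PySem.Dict.getD_of_get?_eq_some _ _ hg]
    unfold pvPar
    rw [hg]
    rfl

-- `find` with enough fuel returns the root and only compresses paths:
-- value/keys/rank are reported; roots are preserved; entries of rank ≥ rk x untouched
lemma pvFind_ok {rk : String → Nat} :
    ∀ fuel n (d : PySem.Dict String String) (x : String),
      pvVK d → pvRank d rk → x ∈ d.keys → pvRooted d x n → n + 1 ≤ fuel →
      (ufFind fuel d x).1 = pvRoot d x ∧
      pvVK (ufFind fuel d x).2 ∧ pvRank (ufFind fuel d x).2 rk ∧
      (ufFind fuel d x).2.keys = d.keys ∧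
      (∀ z, pvRoot (ufFind fuel d x).2 z = pvRoot d z) ∧
      (∀ z, rk x < rk z → pvPar (ufFind fuel d x).2 z = pvPar d z) := by
  intro fuel
  induction fuel with
  | zero => intro n d x _ _ _ _ h; omega
  | succ fuel ih =>
    intro n d x hVK hR hx hrooted hfuel
    have hWF : pvWF d := ⟨hVK, rk, hR⟩
    have hgd : d.getD x "" = pvPar d x := pvGetD_par hx
    by_cases hp : pvPar d x = x
    · have : ufFind (fuel + 1) d x = (pvPar d x, d) := by
        simp only [ufFind, hgd, hp]
        simp
      rw [this]
      refine ⟨by rw [hp, pvRoot_of_fix hp], hVK, hR, rfl, fun z => rfl, fun z _ => rfl⟩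
    · have hstep : ufFind (fuel + 1) d x =
          ((ufFind fuel d (pvPar d x)).1,
            (ufFind fuel d (pvPar d x)).2.insert x (ufFind fuel d (pvPar d x)).1) := by
        simp only [ufFind, hgd]
        rw [if_pos hp]
      have hn : n ≠ 0 := by
        intro he
        subst he
        exact hp hrooted
      obtain ⟨n', rfl⟩ : ∃ n', n = n' + 1 := ⟨n - 1, by omega⟩
      have hpk := (pvPar_mem hVK hp).2
      have hrkp : rk (pvPar d x) < rk x := pvRank_of_par hR hp
      obtain ⟨hv1, hVK1, hR1, hk1, hroots1, hpar1⟩ :=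
        ih n' d (pvPar d x) hVK hR hpk (pvRooted_step hp hrooted) (by omega)
      set d1 := (ufFind fuel d (pvPar d x)).2 with hd1
      set r := (ufFind fuel d (pvPar d x)).1 with hrdef
      have hWF1 : pvWF d1 := ⟨hVK1, rk, hR1⟩
      have hr : r = pvRoot d x := by rw [hv1, pvRoot_par hWF]
      have hpar1x : pvPar d1 x = pvPar d x := hpar1 x hrkp
      have hxk1 : x ∈ d1.keys := by rw [hk1]; exact hx
      have hpar1x_ne : pvPar d1 x ≠ x := by rw [hpar1x]; exact hp
      have hroot1x : pvRoot d1 x = r := by rw [hroots1, hr]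
      have hrk_r : rk r < rk x := by
        rw [hr]; exact pvRank_root_lt hWF hR hp
      have hrmem : r ∈ d.keys := by rw [hr]; exact pvRoot_mem hVK _ hx
      have hrmem1 : r ∈ d1.keys := by rw [hk1]; exact hrmem
      rw [hstep]
      refine ⟨hr, ?_, ?_, ?_, ?_, ?_⟩
      · exact pvVK_insert hVK1 hrmem1
      · exact pvRank_insert hR1 hrk_r
      · rw [PySem.Dict.keys_insert_of_contains _ _ ((PySem.Dict.contains_iff_mem_keys d1 x).2 hxk1), hk1]
      · intro z
        rw [pvInsert_root_pres hVK1 hR1 hxk1 hpar1x_ne hroot1x z, hroots1]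
      · intro z hz
        rw [pvPar_insert, if_neg (by intro he; subst he; omega), hpar1 z (by omega)]

lemma pvSize_eq (d : PySem.Dict String String) : d.size = d.keys.length := by
  simp [PySem.Dict.size, PySem.Dict.keys]

lemma pvUnion_ok {d : PySem.Dict String String} (hWF : pvWF d) {x y : String}
    (hx : x ∈ d.keys) (hy : y ∈ d.keys) :
    pvWF (ufUnion d x y) ∧ (ufUnion d x y).keys = d.keys ∧
      (∀ z, pvRoot (ufUnion d x y) z =
        if pvRoot d z = pvRoot d x then pvRoot d y else pvRoot d z) := by
  obtain ⟨hVK, rk, hR⟩ := hWF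
  have hWF : pvWF d := ⟨hVK, rk, hR⟩
  obtain ⟨hv1, hVK1, hR1, hk1, hroots1, _⟩ :=
    pvFind_ok (rk := rk) (d.size + 1) d.keys.length d x hVK hR hx
      (pvRooted_len hWF x) (by rw [pvSize_eq])
  set d1 := (ufFind (d.size + 1) d x).2 with hd1
  set r1 := (ufFind (d.size + 1) d x).1 with hr1
  have hWF1 : pvWF d1 := ⟨hVK1, rk, hR1⟩
  have hy1 : y ∈ d1.keys := by rw [hk1]; exact hy
  obtain ⟨hv2, hVK2, hR2, hk2, hroots2, _⟩ :=
    pvFind_ok (rk := rk) (d1.size + 1) d1.keys.length d1 y hVK1 hR1 hy1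
      (pvRooted_len hWF1 y) (by rw [pvSize_eq])
  set d2 := (ufFind (d1.size + 1) d1 y).2 with hd2
  set r2 := (ufFind (d1.size + 1) d1 y).1 with hr2
  have hWF2 : pvWF d2 := ⟨hVK2, rk, hR2⟩
  have hr1v : r1 = pvRoot d x := hv1
  have hr2v : r2 = pvRoot d y := by rw [hv2, hroots1]
  have hkeys2 : d2.keys = d.keys := by rw [hk2, hk1]
  have hroots2' : ∀ z, pvRoot d2 z = pvRoot d z := fun z => by rw [hroots2, hroots1]
  have hUnfold : ufUnion d x y = if r1 ≠ r2 then d2.insert r1 r2 else d2 := by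
    simp only [ufUnion, ← hd1, ← hr1, ← hd2, ← hr2]
  by_cases hne : r1 = r2
  · rw [hUnfold, if_neg (by simpa using hne)]
    refine ⟨hWF2, hkeys2, fun z => ?_⟩
    rw [hroots2' z]
    by_cases hc : pvRoot d z = pvRoot d x
    · rw [if_pos hc, hc, hr1v.symm, hne, hr2v]
    · rw [if_neg hc]
  · rw [hUnfold, if_pos (by simpa using hne)]
    have hr1k : r1 ∈ d2.keys := by
      rw [hkeys2, hr1v]; exact pvRoot_mem hVK _ hx
    have hr2k : r2 ∈ d2.keys := by
      rw [hkeys2, hr2v]; exact pvRoot_mem hVK _ hy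
    have hp1 : pvPar d2 r1 = r1 := by
      have : pvRoot d2 x = r1 := by rw [hroots2' x, hr1v]
      rw [← this]; exact pvRoot_fixp hWF2 x
    have hp2 : pvPar d2 r2 = r2 := by
      have : pvRoot d2 y = r2 := by rw [hroots2' y, hr2v]
      rw [← this]; exact pvRoot_fixp hWF2 y
    obtain ⟨hmerge, hWF'⟩ := pvInsert_root_merge hVK2 hR2 hr1k hr2k hp1 hp2 hne
    refine ⟨hWF', ?_, fun z => ?_⟩
    · rw [PySem.Dict.keys_insert_of_contains _ _
        ((PySem.Dict.contains_iff_mem_keys d2 r1).2 hr1k), hkeys2]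
    · rw [hmerge z, hroots2' z, ← hr1v, ← hr2v]

-- A's per-pair body: self-insert absent endpoints, then union
lemma pvSelfIns_ok {d : PySem.Dict String String} (hWF : pvWF d) (x : String) :
    pvWF (if d.contains x then d else d.insert x x) ∧
      (∀ k ∈ d.keys, k ∈ (if d.contains x then d else d.insert x x).keys) ∧
      x ∈ (if d.contains x then d else d.insert x x).keys ∧
      (∀ z, pvRoot (if d.contains x then d else d.insert x x) z = pvRoot d z) := by
  by_cases hc : d.contains x
  · rw [if_pos hc]
    exact ⟨hWF, fun k hk => hk, (PySem.Dict.contains_iff_mem_keys d x).1 hc, fun z => rfl⟩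
  · rw [if_neg (by simpa using hc)]
    have hx : x ∉ d.keys := fun hm => hc ((PySem.Dict.contains_iff_mem_keys d x).2 hm)
    obtain ⟨hVK, rk, hR⟩ := hWF
    have hWF : pvWF d := ⟨hVK, rk, hR⟩
    have hpar := pvPar_insert_self_fresh hx
    have hVK' : pvVK (d.insert x x) := by
      intro p hp
      rcases (PySem.Dict.mem_items_insert d x x p).1 hp with he | ⟨hm, _⟩
      · rw [he]; exact (PySem.Dict.mem_keys_insert d x x x).2 (Or.inl rfl)
      · exact (PySem.Dict.mem_keys_insert d x p.2 x).2 (Or.inr (hVK _ hm))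
    have hR' : pvRank (d.insert x x) rk := by
      intro z w hg
      rw [PySem.Dict.get?_insert] at hg
      by_cases hz : z = x
      · rw [if_pos hz] at hg; cases hg; exact Or.inl hz.symm
      · rw [if_neg hz] at hg; exact hR z w hg
    have hWF' : pvWF (d.insert x x) := ⟨hVK', rk, hR'⟩
    exact ⟨hWF', fun k hk => (PySem.Dict.mem_keys_insert d x k x).2 (Or.inr hk),
      (PySem.Dict.mem_keys_insert d x x x).2 (Or.inl rfl),
      fun z => pvRoot_congr hWF' hWF hpar z⟩

lemma pvLab_of_not_mem {d : PySem.Dict String String} {z : String} (h : z ∉ d.keys) :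
    pvLab d z = z := by
  unfold pvLab
  rw [PySem.Dict.getD_eq_get?_getD, (PySem.Dict.get?_eq_none_iff_not_mem_keys d z).2 h]
  rfl

lemma pvLab_mem_fix {d : PySem.Dict String String} (hB : pvBWF d) {z : String}
    (hz : z ∈ d.keys) : pvLab d z ∈ d.keys ∧ pvLab d (pvLab d z) = pvLab d z := by
  cases hg : d.get? z with
  | none => exact absurd hz ((PySem.Dict.get?_eq_none_iff_not_mem_keys d z).1 hg)
  | some v =>
    have hlab : pvLab d z = v := PySem.Dict.getD_of_get?_eq_some d z hg
    have hitem := PySem.Dict.mem_items_of_get?_eq_some d hg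
    obtain ⟨hk, hfix⟩ := hB.2 _ hitem
    rw [hlab]
    exact ⟨hk, hfix⟩

lemma pvLab_selfIns {d : PySem.Dict String String} (hB : pvBWF d) (x : String) :
    pvBWF (if d.contains x then d else d.insert x x) ∧
      x ∈ (if d.contains x then d else d.insert x x).keys ∧
      (∀ z, pvLab (if d.contains x then d else d.insert x x) z = pvLab d z) := by
  by_cases hc : d.contains x
  · rw [if_pos hc]
    exact ⟨hB, (PySem.Dict.contains_iff_mem_keys d x).1 hc, fun z => rfl⟩
  · rw [if_neg (by simpa using hc)]
    have hx : x ∉ d.keys := fun hm => hc ((PySem.Dict.contains_iff_mem_keys d x).2 hm)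
    have hlab : ∀ z, pvLab (d.insert x x) z = pvLab d z := by
      intro z
      unfold pvLab
      rw [PySem.Dict.getD_insert]
      by_cases hz : z = x
      · rw [if_pos hz, hz]
        show x = pvLab d x
        rw [pvLab_of_not_mem hx]
      · rw [if_neg hz]
    refine ⟨⟨PySem.Dict.nodup_keys_insert d x x hB.1, ?_⟩,
      (PySem.Dict.mem_keys_insert d x x x).2 (Or.inl rfl), hlab⟩
    intro p hp
    rcases (PySem.Dict.mem_items_insert d x x p).1 hp with he | ⟨hm, _⟩
    · rw [he]
      refine ⟨(PySem.Dict.mem_keys_insert d x x x).2 (Or.inl rfl), ?_⟩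
      show pvLab (d.insert x x) x = x
      rw [hlab x, pvLab_of_not_mem hx]
    · obtain ⟨hk, hfix⟩ := hB.2 _ hm
      exact ⟨(PySem.Dict.mem_keys_insert d x p.2 x).2 (Or.inr hk),
        by show pvLab (d.insert x x) p.2 = p.2; rw [hlab]; exact hfix⟩

lemma pvRelabel_keys (d : PySem.Dict String String) (lx ly : String) :
    (PySem.Dict.mk (d.items.map (fun kv => (kv.1, if kv.2 = lx then ly else kv.2)))).keys
      = d.keys := by
  show (d.items.map _).map _ = d.items.map _
  rw [List.map_map]
  rfl

lemma pvRelabel_lab {d : PySem.Dict String String} (hB : pvBWF d) {lx ly : String}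
    (hlxk : lx ∈ d.keys) :
    ∀ z, pvLab (PySem.Dict.mk (d.items.map (fun kv => (kv.1, if kv.2 = lx then ly else kv.2)))) z
      = if pvLab d z = lx then ly else pvLab d z := by
  intro z
  set d' := PySem.Dict.mk (d.items.map (fun kv => (kv.1, if kv.2 = lx then ly else kv.2))) with hd'
  have hkeys : d'.keys = d.keys := pvRelabel_keys d lx ly
  by_cases hz : z ∈ d.keys
  · cases hg : d.get? z with
    | none => exact absurd hz ((PySem.Dict.get?_eq_none_iff_not_mem_keys d z).1 hg)
    | some v =>
      have hlab : pvLab d z = v := PySem.Dict.getD_of_get?_eq_some d z hg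
      have hitem := PySem.Dict.mem_items_of_get?_eq_some d hg
      have hitem' : (z, if v = lx then ly else v) ∈ d'.items :=
        List.mem_map.2 ⟨(z, v), hitem, rfl⟩
      have : pvLab d' z = if v = lx then ly else v :=
        PySem.Dict.getD_of_mem_items d' hitem' (by rw [hkeys]; exact hB.1) z
      rw [this, hlab]
  · have hz' : z ∉ d'.keys := by rw [hkeys]; exact hz
    rw [pvLab_of_not_mem hz, pvLab_of_not_mem hz']
    rw [if_neg (fun he => hz (by rw [he]; exact hlxk))]

lemma pvRelabel_BWF {d : PySem.Dict String String} (hB : pvBWF d) {lx ly : String}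
    (hlxk : lx ∈ d.keys) (hlyk : ly ∈ d.keys) (hlyfix : pvLab d ly = ly) (hne : lx ≠ ly) :
    pvBWF (PySem.Dict.mk (d.items.map (fun kv => (kv.1, if kv.2 = lx then ly else kv.2)))) := by
  set d' := PySem.Dict.mk (d.items.map (fun kv => (kv.1, if kv.2 = lx then ly else kv.2))) with hd'
  have hkeys : d'.keys = d.keys := pvRelabel_keys d lx ly
  have hlabf := pvRelabel_lab hB hlxk (ly := ly)
  refine ⟨by rw [hkeys]; exact hB.1, ?_⟩
  intro p hp
  obtain ⟨⟨k, v⟩, hm, he⟩ := List.mem_map.1 hp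
  obtain ⟨hvk, hvfix⟩ := hB.2 _ hm
  subst he
  by_cases hv : v = lx
  · rw [if_pos hv]
    refine ⟨by rw [hkeys]; exact hlyk, ?_⟩
    show pvLab d' ly = ly
    rw [hlabf ly, hlyfix, if_neg (fun he => hne he.symm)]
  · rw [if_neg hv]
    refine ⟨by rw [hkeys]; exact hvk, ?_⟩
    show pvLab d' v = v
    rw [hlabf v]
    simp only at hvfix
    show (if pvLab d v = lx then ly else pvLab d v) = v
    rw [show pvLab d v = v from hvfix, if_neg hv]

-- collapsing class X into class Y on both sides preserves "same class"
lemma pvMerge_iff (f g : String → String) (X Y : String)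
    (h : ∀ u v, f u = f v ↔ g u = g v) (u v : String) :
    ((if f u = f X then f Y else f u) = if f v = f X then f Y else f v) ↔
      ((if g u = g X then g Y else g u) = if g v = g X then g Y else g v) := by
  by_cases h1 : f u = f X <;> by_cases h2 : f v = f X
  · rw [if_pos h1, if_pos h2, if_pos ((h u X).1 h1), if_pos ((h v X).1 h2)]
    exact ⟨fun _ => rfl, fun _ => rfl⟩
  · rw [if_pos h1, if_neg h2, if_pos ((h u X).1 h1),
      if_neg (fun c => h2 ((h v X).2 c))]
    exact h Y v
  · rw [if_neg h1, if_pos h2, if_neg (fun c => h1 ((h u X).2 c)), if_pos ((h v X).1 h2)]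
    exact h u Y
  · rw [if_neg h1, if_neg h2, if_neg (fun c => h1 ((h u X).2 c)),
      if_neg (fun c => h2 ((h v X).2 c))]
    exact h u v

-- A's per-pair body, packaged
lemma pvAStep {d : PySem.Dict String String} (hWF : pvWF d) (x y : String) :
    pvWF (ufUnion (let d1 := if d.contains x then d else d.insert x x;
                   if d1.contains y then d1 else d1.insert y y) x y) ∧
    (∀ k ∈ d.keys, k ∈ (ufUnion (let d1 := if d.contains x then d else d.insert x x;
                   if d1.contains y then d1 else d1.insert y y) x y).keys) ∧
    (∀ z, pvRoot (ufUnion (let d1 := if d.contains x then d else d.insert x x;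
                   if d1.contains y then d1 else d1.insert y y) x y) z =
      if pvRoot d z = pvRoot d x then pvRoot d y else pvRoot d z) := by
  obtain ⟨hWF1, hsup1, hx1, hroots1⟩ := pvSelfIns_ok hWF x
  set d1 := if d.contains x then d else d.insert x x with hd1
  obtain ⟨hWF2, hsup2, hy2, hroots2⟩ := pvSelfIns_ok hWF1 y
  set d2 := if d1.contains y then d1 else d1.insert y y with hd2
  have hx2 : x ∈ d2.keys := hsup2 _ hx1
  have hroots12 : ∀ z, pvRoot d2 z = pvRoot d z := fun z => by rw [hroots2, hroots1]
  obtain ⟨hWFu, hkeysu, hrootsu⟩ := pvUnion_ok hWF2 hx2 hy2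
  refine ⟨hWFu, ?_, ?_⟩
  · intro k hk
    rw [hkeysu]
    exact hsup2 _ (hsup1 _ hk)
  · intro z
    rw [hrootsu z, hroots12 z, hroots12 x, hroots12 y]

-- B's pairs loop body as a named function (proof-side only; defeq to the port's lambda)
def pvBBody (l : PySem.Dict String String) (pair : List String) : PySem.Dict String String :=
  match pair with
  | [x, y] =>
    let l1 := if l.contains x then l else l.insert x x
    let l2 := if l1.contains y then l1 else l1.insert y y
    let lx := l2.getD x x
    let ly := l2.getD y y
    if lx ≠ ly then
      PySem.Dict.mk (l2.items.map (fun kv => (kv.1, if kv.2 = lx then ly else kv.2)))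
    else l2
  | _ => l

-- B's per-pair body, packaged
lemma pvBStep (l : PySem.Dict String String) (x y : String) (hB : pvBWF l) :
    pvBWF (pvBBody l [x, y]) ∧
    (∀ z, pvLab (pvBBody l [x, y]) z =
      if pvLab l z = pvLab l x then pvLab l y else pvLab l z) := by
  obtain ⟨hB1, hx1, hlab1⟩ := pvLab_selfIns hB x
  set l1 := if l.contains x then l else l.insert x x with hl1
  obtain ⟨hB2, hy2, hlab2⟩ := pvLab_selfIns hB1 y
  set l2 := if l1.contains y then l1 else l1.insert y y with hl2
  have hx2 : x ∈ l2.keys := by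
    by_cases hc : l1.contains y
    · rw [hl2, if_pos hc]; exact hx1
    · rw [hl2, if_neg (by simpa using hc)]
      exact (PySem.Dict.mem_keys_insert l1 y x y).2 (Or.inr hx1)
  have hlab12 : ∀ z, pvLab l2 z = pvLab l z := fun z => by rw [hlab2, hlab1]
  have hred : pvBBody l [x, y] =
      if l2.getD x x ≠ l2.getD y y then
        PySem.Dict.mk (l2.items.map
          (fun kv => (kv.1, if kv.2 = l2.getD x x then l2.getD y y else kv.2)))
      else l2 := by
    rw [hl2, hl1]; rfl
  rw [hred]
  have hgx : l2.getD x x = pvLab l2 x := rfl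
  have hgy : l2.getD y y = pvLab l2 y := rfl
  by_cases hne : l2.getD x x ≠ l2.getD y y
  · rw [if_pos hne]
    have hlxk : l2.getD x x ∈ l2.keys := by rw [hgx]; exact (pvLab_mem_fix hB2 hx2).1
    have hlyk : l2.getD y y ∈ l2.keys := by rw [hgy]; exact (pvLab_mem_fix hB2 hy2).1
    have hlyfix : pvLab l2 (l2.getD y y) = l2.getD y y := (pvLab_mem_fix hB2 hy2).2
    refine ⟨pvRelabel_BWF hB2 hlxk hlyk hlyfix hne, fun z => ?_⟩
    rw [pvRelabel_lab hB2 (ly := l2.getD y y) hlxk z, hlab12 z, hgx, hgy,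
      hlab12 x, hlab12 y]
  · rw [if_neg hne]
    rw [not_ne_iff] at hne
    have hxy : pvLab l x = pvLab l y := by rw [← hlab12 x, ← hlab12 y, ← hgx, ← hgy, hne]
    refine ⟨hB2, fun z => ?_⟩
    rw [hlab12 z]
    by_cases hc : pvLab l z = pvLab l x
    · rw [if_pos hc, hc, hxy]
    · rw [if_neg hc]

lemma pvFold_inv : ∀ (ps : List (List String)) (dA dB : PySem.Dict String String),
    pvWF dA → pvBWF dB → pvREL dA dB →
    pvWF (ufPairs ps dA) ∧ pvBWF (ps.foldl pvBBody dB) ∧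
      pvREL (ufPairs ps dA) (ps.foldl pvBBody dB) ∧
      (∀ k ∈ dA.keys, k ∈ (ufPairs ps dA).keys) := by
  intro ps
  induction ps with
  | nil => intro dA dB h1 h2 h3; exact ⟨h1, h2, h3, fun k hk => hk⟩
  | cons p ps ih =>
    intro dA dB h1 h2 h3
    rcases p with _ | ⟨x, _ | ⟨y, _ | ⟨w, t⟩⟩⟩
    · simpa [ufPairs, List.foldl_cons, pvBBody] using ih dA dB h1 h2 h3
    · simpa [ufPairs, List.foldl_cons, pvBBody] using ih dA dB h1 h2 h3
    · -- the real pair case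
      obtain ⟨hWA, hsupA, hrootsA⟩ := pvAStep h1 x y
      obtain ⟨hWB, hlabB⟩ := pvBStep dB x y h2
      have hREL' : pvREL
          (ufUnion (let d1 := if dA.contains x then dA else dA.insert x x;
            if d1.contains y then d1 else d1.insert y y) x y)
          (pvBBody dB [x, y]) := by
        intro u v
        rw [hrootsA u, hrootsA v, hlabB u, hlabB v]
        exact pvMerge_iff (pvRoot dA) (pvLab dB) x y h3 u v
      have hstepA : ufPairs (List.cons [x, y] ps) dA = ufPairs ps
          (ufUnion (let d1 := if dA.contains x then dA else dA.insert x x;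
            if d1.contains y then d1 else d1.insert y y) x y) := rfl
      have hstepB : (List.cons [x, y] ps).foldl pvBBody dB =
          ps.foldl pvBBody (pvBBody dB [x, y]) := rfl
      rw [hstepA, hstepB]
      obtain ⟨hA', hB', hR', hsup'⟩ := ih _ _ hWA hWB hREL'
      exact ⟨hA', hB', hR', fun k hk => hsup' _ (hsupA _ hk)⟩
    · simpa [ufPairs, List.foldl_cons, pvBBody] using ih dA dB h1 h2 h3

lemma pvWF_of_par_self {d : PySem.Dict String String} (hnd : d.keys.Nodup)
    (hpar : ∀ z, pvPar d z = z) : pvWF d := by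
  refine ⟨?_, fun _ => 0, ?_⟩
  · intro p hp
    have hg := PySem.Dict.get?_of_mem_items d hp hnd
    have : pvPar d p.1 = p.2 := by unfold pvPar; rw [hg]; rfl
    rw [← this, hpar p.1]
    exact PySem.Dict.mem_keys_of_mem_items d hp
  · intro z w hg
    have : pvPar d z = w := by unfold pvPar; rw [hg]; rfl
    rw [← this, hpar z]
    exact Or.inl rfl

lemma pvInitFold (w1 w2 : List String) :
    ∀ (L : List Int) (d : PySem.Dict String String), d.keys.Nodup → (∀ z, pvPar d z = z) →
      (L.foldl (fun d i =>
        let a := (PySem.List.pyGet? w1 i).getD ""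
        let b := (PySem.List.pyGet? w2 i).getD ""
        (d.insert a a).insert b b) d).keys.Nodup ∧
      (∀ z, pvPar (L.foldl (fun d i =>
        let a := (PySem.List.pyGet? w1 i).getD ""
        let b := (PySem.List.pyGet? w2 i).getD ""
        (d.insert a a).insert b b) d) z = z) ∧
      (∀ k ∈ d.keys, k ∈ (L.foldl (fun d i =>
        let a := (PySem.List.pyGet? w1 i).getD ""
        let b := (PySem.List.pyGet? w2 i).getD ""
        (d.insert a a).insert b b) d).keys) ∧
      (∀ i ∈ L, ((PySem.List.pyGet? w1 i).getD "") ∈ (L.foldl (fun d i =>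
        let a := (PySem.List.pyGet? w1 i).getD ""
        let b := (PySem.List.pyGet? w2 i).getD ""
        (d.insert a a).insert b b) d).keys ∧
        ((PySem.List.pyGet? w2 i).getD "") ∈ (L.foldl (fun d i =>
        let a := (PySem.List.pyGet? w1 i).getD ""
        let b := (PySem.List.pyGet? w2 i).getD ""
        (d.insert a a).insert b b) d).keys) := by
  intro L
  induction L with
  | nil =>
    intro d hnd hpar
    exact ⟨hnd, hpar, fun k hk => hk, fun i hi => absurd hi (List.not_mem_nil)⟩
  | cons i L ih =>
    intro d hnd hpar
    set a := (PySem.List.pyGet? w1 i).getD "" with ha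
    set b := (PySem.List.pyGet? w2 i).getD "" with hb
    have hnd' : ((d.insert a a).insert b b).keys.Nodup :=
      PySem.Dict.nodup_keys_insert _ b b (PySem.Dict.nodup_keys_insert d a a hnd)
    have hpar' : ∀ z, pvPar ((d.insert a a).insert b b) z = z := by
      intro z
      rw [pvPar_insert, pvPar_insert]
      by_cases hzb : z = b
      · rw [if_pos hzb, hzb]
      · rw [if_neg hzb]
        by_cases hza : z = a
        · rw [if_pos hza, hza]
        · rw [if_neg hza, hpar]
    obtain ⟨h1, h2, h3, h4⟩ := ih ((d.insert a a).insert b b) hnd' hpar'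
    refine ⟨h1, h2, ?_, ?_⟩
    · intro k hk
      exact h3 k ((PySem.Dict.mem_keys_insert _ b k b).2
        (Or.inr ((PySem.Dict.mem_keys_insert d a k a).2 (Or.inr hk))))
    · intro j hj
      rcases List.mem_cons.1 hj with rfl | hj'
      · constructor
        · exact h3 _ ((PySem.Dict.mem_keys_insert _ b a b).2
            (Or.inr ((PySem.Dict.mem_keys_insert d a a a).2 (Or.inl rfl))))
        · exact h3 _ ((PySem.Dict.mem_keys_insert _ b b b).2 (Or.inl rfl))
      · exact h4 j hj'

lemma pvInit_ok (w1 w2 : List String) :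
    (ufInit w1 w2).keys.Nodup ∧ (∀ z, pvPar (ufInit w1 w2) z = z) ∧
      (∀ i ∈ PySem.List.pyRange 0 (w1.length : Int) 1,
        ((PySem.List.pyGet? w1 i).getD "") ∈ (ufInit w1 w2).keys ∧
        ((PySem.List.pyGet? w2 i).getD "") ∈ (ufInit w1 w2).keys) := by
  have h := pvInitFold w1 w2 (PySem.List.pyRange 0 (w1.length : Int) 1) PySem.Dict.empty
    (by rw [PySem.Dict.keys_empty]; exact List.nodup_nil)
    (fun z => by unfold pvPar; rw [PySem.Dict.get?_empty]; rfl)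
  exact ⟨h.1, h.2.1, h.2.2.2⟩

lemma pvCheck (w1 w2 : List String) (dB : PySem.Dict String String) :
    ∀ (idxs : List Int) (dA : PySem.Dict String String), pvWF dA → pvREL dA dB →
      (∀ i ∈ idxs, ((PySem.List.pyGet? w1 i).getD "") ∈ dA.keys ∧
        ((PySem.List.pyGet? w2 i).getD "") ∈ dA.keys) →
      ufCheck w1 w2 dA idxs = idxs.all (fun i =>
        (pvLab dB ((PySem.List.pyGet? w1 i).getD "")) ==
          (pvLab dB ((PySem.List.pyGet? w2 i).getD ""))) := by
  intro idxs
  induction idxs with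
  | nil => intro dA _ _ _; rfl
  | cons i rest ih =>
    intro dA hWF hREL hmem
    obtain ⟨hb1, hb2⟩ := hmem i (List.mem_cons_self)
    obtain ⟨hVK, rk, hR⟩ := hWF
    have hWF : pvWF dA := ⟨hVK, rk, hR⟩
    obtain ⟨hv2, hVK2, hR2, hk2, hroots2, _⟩ :=
      pvFind_ok (rk := rk) (dA.size + 1) dA.keys.length dA _ hVK hR hb2
        (pvRooted_len hWF _) (by rw [pvSize_eq])
    set d2 := (ufFind (dA.size + 1) dA ((PySem.List.pyGet? w2 i).getD "")).2 with hd2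
    have hWF2 : pvWF d2 := ⟨hVK2, rk, hR2⟩
    have hb1' : ((PySem.List.pyGet? w1 i).getD "") ∈ d2.keys := by rw [hk2]; exact hb1
    obtain ⟨hv1, hVK1, hR1, hk1, hroots1, _⟩ :=
      pvFind_ok (rk := rk) (d2.size + 1) d2.keys.length d2 _ hVK2 hR2 hb1'
        (pvRooted_len hWF2 _) (by rw [pvSize_eq])
    set d1 := (ufFind (d2.size + 1) d2 ((PySem.List.pyGet? w1 i).getD "")).2 with hd1
    have hWF1 : pvWF d1 := ⟨hVK1, rk, hR1⟩
    have hr2 : (ufFind (dA.size + 1) dA ((PySem.List.pyGet? w2 i).getD "")).1 =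
        pvRoot dA ((PySem.List.pyGet? w2 i).getD "") := hv2
    have hr1 : (ufFind (d2.size + 1) d2 ((PySem.List.pyGet? w1 i).getD "")).1 =
        pvRoot dA ((PySem.List.pyGet? w1 i).getD "") := by rw [hv1, hroots2]
    have hstep : ufCheck w1 w2 dA (i :: rest) =
        if (ufFind (dA.size + 1) dA ((PySem.List.pyGet? w2 i).getD "")).1 ≠
            (ufFind (d2.size + 1) d2 ((PySem.List.pyGet? w1 i).getD "")).1 then false
        else ufCheck w1 w2 d1 rest := rfl
    rw [hstep, hr1, hr2]
    rw [List.all_cons]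
    by_cases heq : pvRoot dA ((PySem.List.pyGet? w2 i).getD "") =
        pvRoot dA ((PySem.List.pyGet? w1 i).getD "")
    · rw [if_neg (by simpa using heq)]
      have hlab : pvLab dB ((PySem.List.pyGet? w1 i).getD "") =
          pvLab dB ((PySem.List.pyGet? w2 i).getD "") := (hREL _ _).1 heq.symm
      have hhead : (pvLab dB ((PySem.List.pyGet? w1 i).getD "") ==
          pvLab dB ((PySem.List.pyGet? w2 i).getD "")) = true := by
        exact beq_iff_eq.2 hlab
      rw [hhead, Bool.true_and]
      refine ih d1 hWF1 ?_ ?_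
      · intro u v
        rw [show pvRoot d1 u = pvRoot dA u from by rw [hroots1, hroots2],
          show pvRoot d1 v = pvRoot dA v from by rw [hroots1, hroots2]]
        exact hREL u v
      · intro j hj
        obtain ⟨hm1, hm2⟩ := hmem j (List.mem_cons_of_mem _ hj)
        rw [hk1, hk2]
        exact ⟨hm1, hm2⟩
    · rw [if_pos (by simpa using heq)]
      have hlab : pvLab dB ((PySem.List.pyGet? w1 i).getD "") ≠
          pvLab dB ((PySem.List.pyGet? w2 i).getD "") := by
        intro hl
        exact heq ((hREL _ _).2 hl.symm)
      rw [show (pvLab dB ((PySem.List.pyGet? w1 i).getD "") ==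
          pvLab dB ((PySem.List.pyGet? w2 i).getD "")) = false from beq_eq_false_iff_ne.2 hlab]
      rw [Bool.false_and]

lemma pvRange_zip_all (w1 w2 : List String) (h : w1.length = w2.length)
    (F : String → String → Bool) :
    (PySem.List.pyRange 0 (w2.length : Int) 1).all (fun i =>
      F ((PySem.List.pyGet? w1 i).getD "") ((PySem.List.pyGet? w2 i).getD ""))
      = (w1.zip w2).all (fun ab => F ab.1 ab.2) := by
  rw [Bool.eq_iff_iff]
  simp only [List.all_eq_true]
  constructor
  · intro H ab hab
    obtain ⟨j, hj, hget⟩ := List.mem_iff_getElem.1 hab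
    have hjlen : j < w2.length := by
      rw [List.length_zip, h, Nat.min_self] at hj
      exact hj
    have hmem : (j : Int) ∈ PySem.List.pyRange 0 (w2.length : Int) 1 :=
      PySem.List.mem_pyRange_one.2 ⟨by omega, by exact_mod_cast hjlen⟩
    have := H (j : Int) hmem
    rw [PySem.List.pyGet?_natCast, PySem.List.pyGet?_natCast,
      List.getElem?_eq_getElem (by omega), List.getElem?_eq_getElem (by omega)] at this
    simp only [Option.getD_some] at this
    rw [← hget, List.getElem_zip]
    exact this
  · intro H i hi
    obtain ⟨h0, hlt⟩ := PySem.List.mem_pyRange_one.1 hi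
    have hjlen : i.toNat < w2.length := by omega
    have hi' : i = (i.toNat : Int) := by omega
    rw [hi', PySem.List.pyGet?_natCast, PySem.List.pyGet?_natCast,
      List.getElem?_eq_getElem (by omega), List.getElem?_eq_getElem (by omega)]
    simp only [Option.getD_some]
    have hmem : (w1[i.toNat], w2[i.toNat]) ∈ w1.zip w2 :=
      List.mem_iff_getElem.2 ⟨i.toNat, by rw [List.length_zip, h, Nat.min_self]; exact hjlen,
        List.getElem_zip⟩
    exact H _ hmem

-- ===== VERDICT (by name: the statement is the Claim_ definition above) =====
theorem sentenceSimilarity_spec : Claim_equal_sentenceSimilarity := by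
  intro w1 w2 ps _ _
  unfold Spec_sentenceSimilarity sentenceSimilarity sentenceSimilarity_alt
  by_cases hlen : w1.length = w2.length
  · rw [if_neg (by simpa using hlen), if_neg (by simpa using hlen)]
    obtain ⟨hnd0, hpar0, hmem0⟩ := pvInit_ok w1 w2
    have hWF0 : pvWF (ufInit w1 w2) := pvWF_of_par_self hnd0 hpar0
    have hBWF0 : pvBWF (PySem.Dict.empty : PySem.Dict String String) := by
      refine ⟨by rw [PySem.Dict.keys_empty]; exact List.nodup_nil, ?_⟩
      intro p hp
      simp [PySem.Dict.empty] at hp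
    have hREL0 : pvREL (ufInit w1 w2) PySem.Dict.empty := by
      intro u v
      rw [pvRoot_of_fix (hpar0 u), pvRoot_of_fix (hpar0 v)]
      unfold pvLab
      rw [PySem.Dict.getD_empty, PySem.Dict.getD_empty]
    obtain ⟨hWFA, hBWF, hREL, hsup⟩ := pvFold_inv ps (ufInit w1 w2) PySem.Dict.empty
      hWF0 hBWF0 hREL0
    have hfoldB : ps.foldl (fun l pair =>
        match pair with
        | [x, y] =>
          let l1 := if l.contains x then l else l.insert x x
          let l2 := if l1.contains y then l1 else l1.insert y y
          let lx := l2.getD x x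
          let ly := l2.getD y y
          if lx ≠ ly then
            PySem.Dict.mk (l2.items.map (fun kv => (kv.1, if kv.2 = lx then ly else kv.2)))
          else l2
        | _ => l) PySem.Dict.empty = ps.foldl pvBBody PySem.Dict.empty := rfl
    rw [hfoldB]
    have hmem : ∀ i ∈ PySem.List.pyRange 0 (w2.length : Int) 1,
        ((PySem.List.pyGet? w1 i).getD "") ∈ (ufPairs ps (ufInit w1 w2)).keys ∧
        ((PySem.List.pyGet? w2 i).getD "") ∈ (ufPairs ps (ufInit w1 w2)).keys := by
      intro i hi
      rw [← hlen] at hi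
      obtain ⟨hm1, hm2⟩ := hmem0 i hi
      exact ⟨hsup _ hm1, hsup _ hm2⟩
    rw [pvCheck w1 w2 (ps.foldl pvBBody PySem.Dict.empty)
      (PySem.List.pyRange 0 (w2.length : Int) 1) (ufPairs ps (ufInit w1 w2)) hWFA hREL hmem]
    exact pvRange_zip_all w1 w2 hlen
      (fun a b => pvLab (ps.foldl pvBBody PySem.Dict.empty) a ==
        pvLab (ps.foldl pvBBody PySem.Dict.empty) b)
  · rw [if_pos hlen, if_pos hlen]
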